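-- pv_equiv track=rewrite | github.com/stat-thon/Coding-Test-Study-2nd | Dawny/Programmers/13TH/trianglesnail.py | solution
-- ===== SOURCE A (Python) =====
-- def solution(n):
--     # 공간
--     r = [[0 for _ in range(k)] for k in range(1, n+1)]
--
--     # 방향
--     dic = {'D':[1, 0], 'R':[0, 1], 'U':[-1, -1]}
--
--     # 지점
--     place = [-1, 0]
--
--     # 넣을 변수
--     cnt = 0
--
--     # 진행 방향
--     sign = 'D'
--
--     # 돌림
--     for i in range(n, 0, -1):
--         for a in range(i, 0, -1):
--             cnt += 1
--             place[0] += dic[sign][0]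
--             place[1] += dic[sign][1]
--             r[place[0]][place[1]] = cnt
--         if sign == "D":
--             sign = "R"
--         elif sign == "R":
--             sign = "U"
--         else:
--             sign = "D"
--
--     return sum(r, [])
-- ===== SOURCE B (Python) =====
-- def solution(n):
--     # Fill the triangle by peeling concentric layers with direct index
--     # arithmetic (three arms per layer), instead of walking a pointer with a
--     # direction state machine.
--     g = [[0] * (k + 1) for k in range(n)]
--     cnt = 0
--     top, left, size = 0, 0, n
--     while size > 0:
--         for t in range(size):                 # left column, going down
--             cnt += 1
--             g[top + t][left] = cnt
--         for t in range(1, size):              # bottom row, going right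
--             cnt += 1
--             g[top + size - 1][left + t] = cnt
--         for t in range(size - 2):             # diagonal, going up-left
--             cnt += 1
--             g[top + size - 2 - t][left + size - 2 - t] = cnt
--         top += 2
--         left += 1
--         size -= 3
--     return [v for row in g for v in row]
-- ===== Notes on version B (the rewrite author's own statement) =====
-- stated objective: alternative
-- what changed: Replaces the pointer-plus-direction-dictionary state machine (3n segments walked one step at a time, flattened with quadratic sum(r, [])) by layer peeling: each concentric layer's three arms are written by direct index arithmetic from (top,left,size) offsets, recursing on the inner triangle of side n-3, and the grid is flattened with a linear comprehension.
import Mathlib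
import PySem

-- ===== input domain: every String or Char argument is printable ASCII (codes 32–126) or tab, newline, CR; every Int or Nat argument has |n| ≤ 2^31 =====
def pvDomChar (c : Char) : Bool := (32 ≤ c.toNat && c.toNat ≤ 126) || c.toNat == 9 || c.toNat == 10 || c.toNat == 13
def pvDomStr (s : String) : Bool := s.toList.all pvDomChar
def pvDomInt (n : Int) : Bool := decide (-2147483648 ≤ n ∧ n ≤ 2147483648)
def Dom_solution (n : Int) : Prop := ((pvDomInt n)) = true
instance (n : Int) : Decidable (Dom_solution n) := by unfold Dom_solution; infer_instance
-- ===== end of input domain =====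

-- B replaces A's pointer + direction-dictionary state machine by peeling concentric
-- layers, writing each layer's three arms with direct index arithmetic (alternative
-- decomposition, same cost).

-- ===== PORT A =====
-- Python's `r[i][j] = v` (list assignment; indices are always in range here, so the
-- total forms pyGetD/pySetD agree with Python).  Shared assignment primitive of both ports.
def setC (g : List (List Int)) (i j v : Int) : List (List Int) :=
  PySem.List.pySetD g i (PySem.List.pySetD (PySem.List.pyGetD g i []) j v)

-- dic = {'D':[1,0], 'R':[0,1], 'U':[-1,-1]}
def aDic : PySem.Dict String (Int × Int) :=
  PySem.Dict.ofList [("D", (1, 0)), ("R", (0, 1)), ("U", (-1, -1))]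

-- the inner `for a in range(i, 0, -1)` loop; state = (place, cnt, r)
def innerLoop (dic : PySem.Dict String (Int × Int)) (sign : String) (i : Int)
    (st : (Int × Int) × Int × List (List Int)) : (Int × Int) × Int × List (List Int) :=
  (PySem.List.pyRange i 0 (-1)).foldl (fun st2 _a =>
    let cnt := st2.2.1 + 1
    -- dic[sign]: the key is always one of 'D','R','U', so the KeyError branch is dead
    let d := (PySem.Dict.get? dic sign).getD (0, 0)
    let place := (st2.1.1 + d.1, st2.1.2 + d.2)
    (place, cnt, setC st2.2.2 place.1 place.2 cnt)) st

-- one iteration of the outer loop; state = (sign, place, cnt, r)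
def outerStep (dic : PySem.Dict String (Int × Int))
    (st : String × (Int × Int) × Int × List (List Int)) (i : Int) :
    String × (Int × Int) × Int × List (List Int) :=
  let inner := innerLoop dic st.1 i st.2
  let sign := if st.1 == "D" then "R" else if st.1 == "R" then "U" else "D"
  (sign, inner)

def solution (n : Int) : List Int :=
  let r : List (List Int) :=
    (PySem.List.pyRange 1 (n + 1) 1).map (fun k => (PySem.List.pyRange 0 k 1).map (fun _ => (0 : Int)))
  let st := (PySem.List.pyRange n 0 (-1)).foldl (outerStep aDic) ("D", ((-1 : Int), (0 : Int)), (0 : Int), r)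
  -- sum(r, [])
  st.2.2.2.foldl (fun acc row => acc ++ row) []

-- ===== PORT B =====
-- `for t in range(size): g[top+t][left] = cnt` ; state = (cnt, g)
def armDown (top left size : Int) (st : Int × List (List Int)) : Int × List (List Int) :=
  (PySem.List.pyRange 0 size 1).foldl (fun st t =>
    let cnt := st.1 + 1
    (cnt, setC st.2 (top + t) left cnt)) st

-- `for t in range(1, size): g[top+size-1][left+t] = cnt`
def armRight (top left size : Int) (st : Int × List (List Int)) : Int × List (List Int) :=
  (PySem.List.pyRange 1 size 1).foldl (fun st t =>
    let cnt := st.1 + 1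
    (cnt, setC st.2 (top + size - 1) (left + t) cnt)) st

-- `for t in range(size-2): g[top+size-2-t][left+size-2-t] = cnt`
def armDiag (top left size : Int) (st : Int × List (List Int)) : Int × List (List Int) :=
  (PySem.List.pyRange 0 (size - 2) 1).foldl (fun st t =>
    let cnt := st.1 + 1
    (cnt, setC st.2 (top + size - 2 - t) (left + size - 2 - t) cnt)) st

-- the `while size > 0` loop
def fillLayers (top left size cnt : Int) (g : List (List Int)) : List (List Int) :=
  if h : 0 < size then
    let s := armDiag top left size (armRight top left size (armDown top left size (cnt, g)))
    fillLayers (top + 2) (left + 1) (size - 3) s.1 s.2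
  else g
termination_by size.toNat
decreasing_by omega

def solution_alt (n : Int) : List Int :=
  let g : List (List Int) := (PySem.List.pyRange 0 n 1).map (fun k => PySem.List.pyRepeat [(0 : Int)] (k + 1))
  (fillLayers 0 0 n 0 g).flatten

-- ===== PRECONDITION & SPEC =====
def Spec_solution (n : Int) (out : List Int) : Prop := out = solution_alt n
instance (n : Int) (out : List Int) : Decidable (Spec_solution n out) := by unfold Spec_solution; infer_instance

-- ===== CLAIM (what is proved, stated in full; the proofs are below) =====
def Claim_equal_solution : Prop := ∀ (n : Int), Dom_solution n → Spec_solution n (solution n)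

-- ===== LEMMAS AND PROOFS =====

-- apply a list of ((row, col), value) assignments in order
def writes (g : List (List Int)) (l : List ((Int × Int) × Int)) : List (List Int) :=
  l.foldl (fun g pv => setC g pv.1.1 pv.1.2 pv.2) g

-- the assignments made by walking m steps from p in direction d, counting from c
def arm (p d : Int × Int) (c : Int) (m : Nat) : List ((Int × Int) × Int) :=
  (List.range m).map (fun (j : Nat) =>
    ((p.1 + ((j : Int) + 1) * d.1, p.2 + ((j : Int) + 1) * d.2), c + ((j : Int) + 1)))

theorem writes_nil (g : List (List Int)) : writes g [] = g := rfl

theorem writes_cons (g : List (List Int)) (pv : (Int × Int) × Int) (l : List ((Int × Int) × Int)) :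
    writes g (pv :: l) = writes (setC g pv.1.1 pv.1.2 pv.2) l := rfl

theorem arm_succ (p d : Int × Int) (c : Int) (m : Nat) :
    arm p d c (m + 1) =
      ((p.1 + d.1, p.2 + d.2), c + 1) :: arm (p.1 + d.1, p.2 + d.2) d (c + 1) m := by
  simp only [arm, List.range_succ_eq_map, List.map_cons, List.map_map]
  refine congrArg₂ List.cons ?_ ?_
  · simp only [Prod.mk.injEq]; push_cast; refine ⟨⟨by ring, by ring⟩, by ring⟩
  · apply List.map_congr_left
    intro j _
    simp only [Function.comp_apply, Prod.mk.injEq]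
    push_cast
    refine ⟨⟨by ring, by ring⟩, by ring⟩

-- the inner loop of A, for a fixed direction d, over any control list L
theorem innerLoop_generic (d : Int × Int) (L : List Int) :
    ∀ (p : Int × Int) (c : Int) (g : List (List Int)),
    L.foldl (fun st2 (_a : Int) =>
      let cnt := st2.2.1 + 1
      let place := (st2.1.1 + d.1, st2.1.2 + d.2)
      (place, cnt, setC st2.2.2 place.1 place.2 cnt)) (p, c, g)
    = ((p.1 + (L.length : Int) * d.1, p.2 + (L.length : Int) * d.2), c + L.length,
       writes g (arm p d c L.length)) := by
  induction L with
  | nil => intro p c g; simp [arm, writes]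
  | cons a L ih =>
    intro p c g
    simp only [List.foldl_cons, List.length_cons]
    rw [ih (p.1 + d.1, p.2 + d.2) (c + 1) (setC g (p.1 + d.1) (p.2 + d.2) (c + 1))]
    rw [arm_succ, writes_cons]
    push_cast
    refine congrArg₂ _ ?_ (congrArg₂ _ (by ring) rfl)
    simp only [Prod.mk.injEq]
    exact ⟨by ring, by ring⟩

theorem aDic_D : (PySem.Dict.get? aDic "D").getD (0, 0) = ((1 : Int), (0 : Int)) := by decide
theorem aDic_R : (PySem.Dict.get? aDic "R").getD (0, 0) = ((0 : Int), (1 : Int)) := by decide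
theorem aDic_U : (PySem.Dict.get? aDic "U").getD (0, 0) = ((-1 : Int), (-1 : Int)) := by decide

theorem innerLoop_eq (s : String) (d : Int × Int)
    (hd : (PySem.Dict.get? aDic s).getD (0, 0) = d) (i : Int)
    (p : Int × Int) (c : Int) (g : List (List Int)) :
    innerLoop aDic s i (p, c, g)
    = ((p.1 + (i.toNat : Int) * d.1, p.2 + (i.toNat : Int) * d.2), c + i.toNat,
       writes g (arm p d c i.toNat)) := by
  unfold innerLoop
  simp only [hd]
  have h := innerLoop_generic d (PySem.List.pyRange i 0 (-1)) p c g
  simp only [PySem.List.length_pyRange_neg_one] at h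
  simpa using h

-- the assignments made by a fold writing at positions pos t, counting from c
def tagged (pos : Int → Int × Int) (c : Int) : List Int → List ((Int × Int) × Int)
  | [] => []
  | t :: ts => (pos t, c + 1) :: tagged pos (c + 1) ts

theorem armFold_generic (pos : Int → Int × Int) (L : List Int) :
    ∀ (c : Int) (g : List (List Int)),
    L.foldl (fun st t =>
      let cnt := st.1 + 1
      (cnt, setC st.2 (pos t).1 (pos t).2 cnt)) (c, g)
    = (c + L.length, writes g (tagged pos c L)) := by
  induction L with
  | nil => intro c g; simp [tagged, writes]
  | cons a L ih =>
    intro c g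
    simp only [List.foldl_cons, List.length_cons, tagged, writes_cons]
    rw [ih (c + 1) (setC g (pos a).1 (pos a).2 (c + 1))]
    push_cast
    refine congrArg₂ _ (by ring) rfl

theorem tagged_pyRange (pos : Int → Int × Int) :
    ∀ (m : Nat) (a c : Int),
    tagged pos c (PySem.List.pyRange a (a + m) 1)
    = (List.range m).map (fun (j : Nat) => (pos (a + (j : Int)), c + ((j : Int) + 1))) := by
  intro m
  induction m with
  | zero => intro a c; simp [PySem.List.pyRange_one_eq_nil, tagged]
  | succ m ih =>
    intro a c
    rw [PySem.List.pyRange_one_cons (by omega)]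
    have : a + 1 + (m : Int) = a + (m + 1 : Nat) := by push_cast; ring
    simp only [tagged, ← this, ih (a + 1) (c + 1), List.range_succ_eq_map, List.map_cons,
      List.map_map]
    refine congrArg₂ List.cons ?_ ?_
    · simp only [Prod.mk.injEq]; push_cast; exact ⟨by norm_num, by ring⟩
    · apply List.map_congr_left
      intro j _
      simp only [Function.comp_apply, Prod.mk.injEq]
      push_cast
      exact ⟨by ring_nf, by ring⟩

theorem armDown_eq (top left size : Int) (c : Int) (g : List (List Int)) :
    armDown top left size (c, g)
    = (c + size.toNat, writes g (arm (top - 1, left) (1, 0) c size.toNat)) := by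
  refine Eq.trans (armFold_generic (fun t => (top + t, left)) _ c g) ?_
  by_cases hs : (0 : Int) ≤ size
  · rw [show PySem.List.pyRange 0 size 1 = PySem.List.pyRange 0 (0 + (size.toNat : Int)) 1 from by
      congr 1; omega]
    rw [tagged_pyRange, PySem.List.length_pyRange_one]
    refine congrArg₂ Prod.mk (by omega) (congrArg _ ?_)
    simp only [arm]
    apply List.map_congr_left
    intro j _
    simp only [Prod.mk.injEq]
    exact ⟨⟨by ring, by ring⟩, by trivial⟩
  · rw [PySem.List.pyRange_one_eq_nil (by omega)]
    simp [tagged, arm, show size.toNat = 0 from by omega]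

theorem armRight_eq (top left size : Int) (c : Int) (g : List (List Int)) :
    armRight top left size (c, g)
    = (c + (size - 1).toNat,
       writes g (arm (top + size - 1, left) (0, 1) c (size - 1).toNat)) := by
  refine Eq.trans (armFold_generic (fun t => (top + size - 1, left + t)) _ c g) ?_
  by_cases hs : (1 : Int) ≤ size
  · rw [show PySem.List.pyRange 1 size 1 = PySem.List.pyRange 1 (1 + ((size - 1).toNat : Int)) 1 from by
      congr 1; omega]
    rw [tagged_pyRange, PySem.List.length_pyRange_one]
    refine congrArg₂ Prod.mk (by omega) (congrArg _ ?_)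
    simp only [arm]
    apply List.map_congr_left
    intro j _
    simp only [Prod.mk.injEq]
    exact ⟨⟨by ring, by ring⟩, by trivial⟩
  · rw [PySem.List.pyRange_one_eq_nil (by omega)]
    simp [tagged, arm, show (size - 1).toNat = 0 from by omega]

theorem armDiag_eq (top left size : Int) (c : Int) (g : List (List Int)) :
    armDiag top left size (c, g)
    = (c + (size - 2).toNat,
       writes g (arm (top + size - 1, left + size - 1) (-1, -1) c (size - 2).toNat)) := by
  refine Eq.trans (armFold_generic (fun t => (top + size - 2 - t, left + size - 2 - t)) _ c g) ?_
  by_cases hs : (2 : Int) ≤ size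
  · rw [show PySem.List.pyRange 0 (size - 2) 1 = PySem.List.pyRange 0 (0 + ((size - 2).toNat : Int)) 1 from by
      congr 1; omega]
    rw [tagged_pyRange, PySem.List.length_pyRange_one]
    refine congrArg₂ Prod.mk (by omega) (congrArg _ ?_)
    simp only [arm]
    apply List.map_congr_left
    intro j _
    simp only [Prod.mk.injEq]
    exact ⟨⟨by ring, by ring⟩, by trivial⟩
  · rw [PySem.List.pyRange_one_eq_nil (by omega)]
    simp [tagged, arm, show (size - 2).toNat = 0 from by omega]

theorem outerStep_D (i : Int) (p : Int × Int) (c : Int) (g : List (List Int)) :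
    outerStep aDic ("D", p, c, g) i
    = ("R", (p.1 + (i.toNat : Int), p.2), c + i.toNat, writes g (arm p (1, 0) c i.toNat)) := by
  simp only [outerStep]
  rw [innerLoop_eq "D" (1, 0) aDic_D i p c g]
  refine congrArg₂ Prod.mk (by rfl) ?_
  norm_num

theorem outerStep_R (i : Int) (p : Int × Int) (c : Int) (g : List (List Int)) :
    outerStep aDic ("R", p, c, g) i
    = ("U", (p.1, p.2 + (i.toNat : Int)), c + i.toNat, writes g (arm p (0, 1) c i.toNat)) := by
  simp only [outerStep]
  rw [innerLoop_eq "R" (0, 1) aDic_R i p c g]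
  refine congrArg₂ Prod.mk (by rfl) ?_
  norm_num

theorem outerStep_U (i : Int) (p : Int × Int) (c : Int) (g : List (List Int)) :
    outerStep aDic ("U", p, c, g) i
    = ("D", (p.1 - (i.toNat : Int), p.2 - (i.toNat : Int)), c + i.toNat,
       writes g (arm p (-1, -1) c i.toNat)) := by
  simp only [outerStep]
  rw [innerLoop_eq "U" (-1, -1) aDic_U i p c g]
  refine congrArg₂ Prod.mk (by rfl) ?_
  refine congrArg₂ Prod.mk (congrArg₂ Prod.mk (by ring) (by ring)) rfl

theorem main_lemma (N : Nat) : ∀ (n : Int), n.toNat ≤ N → ∀ (t l c : Int) (g : List (List Int)),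
    ((PySem.List.pyRange n 0 (-1)).foldl (outerStep aDic) ("D", (t - 1, l), c, g)).2.2.2
    = fillLayers t l n c g := by
  induction N with
  | zero =>
    intro n hn t l c g
    rw [PySem.List.pyRange_neg_one_eq_nil (by omega), fillLayers]
    simp [show ¬ (0 : Int) < n from by omega]
  | succ N ih =>
    intro n hn t l c g
    by_cases h0 : n ≤ 0
    · rw [PySem.List.pyRange_neg_one_eq_nil (by omega), fillLayers]
      simp [show ¬ (0 : Int) < n from by omega]
    · by_cases h1 : n = 1
      · subst h1
        rw [PySem.List.pyRange_neg_one_cons (show (0 : Int) < 1 from by norm_num),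
            PySem.List.pyRange_neg_one_eq_nil (show (1 : Int) - 1 ≤ 0 from by norm_num)]
        simp only [List.foldl_cons, List.foldl_nil]
        rw [outerStep_D]
        conv_rhs => rw [fillLayers]
        rw [dif_pos (show (0 : Int) < 1 from by norm_num)]
        rw [armDown_eq, armRight_eq, armDiag_eq]
        conv_rhs => rw [fillLayers]
        rw [dif_neg (show ¬ (0 : Int) < 1 - 3 from by norm_num)]
        norm_num [arm, writes_nil, show ((-1 : Int)).toNat = 0 from rfl]
      · by_cases h2 : n = 2
        · subst h2
          rw [PySem.List.pyRange_neg_one_cons (show (0 : Int) < 2 from by norm_num),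
              PySem.List.pyRange_neg_one_cons (show (0 : Int) < 2 - 1 from by norm_num),
              PySem.List.pyRange_neg_one_eq_nil (show (2 : Int) - 1 - 1 ≤ 0 from by norm_num)]
          simp only [List.foldl_cons, List.foldl_nil]
          rw [outerStep_D, outerStep_R]
          conv_rhs => rw [fillLayers]
          rw [dif_pos (show (0 : Int) < 2 from by norm_num)]
          rw [armDown_eq, armRight_eq, armDiag_eq]
          conv_rhs => rw [fillLayers]
          rw [dif_neg (show ¬ (0 : Int) < 2 - 3 from by norm_num)]
          norm_num [arm, writes_nil, show ((-1 : Int)).toNat = 0 from rfl]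
          ring_nf
        · -- n ≥ 3: peel one full layer (three outer iterations) and recurse
          have hn3 : (3 : Int) ≤ n := by omega
          rw [PySem.List.pyRange_neg_one_cons (show (0 : Int) < n by omega),
              PySem.List.pyRange_neg_one_cons (show (0 : Int) < n - 1 by omega),
              PySem.List.pyRange_neg_one_cons (show (0 : Int) < n - 1 - 1 by omega)]
          simp only [List.foldl_cons]
          rw [outerStep_D, outerStep_R, outerStep_U]
          rw [show ((n.toNat : Int)) = n from by omega,
              show (((n - 1).toNat : Int)) = n - 1 from by omega,
              show (((n - 1 - 1).toNat : Int)) = n - 2 from by omega,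
              show n - 1 - 1 - 1 = n - 3 from by ring,
              show n - 1 - 1 = n - 2 from by ring]
          rw [show t - 1 + n = t + n - 1 from by ring,
              show l + (n - 1) = l + n - 1 from by ring,
              show t + n - 1 - (n - 2) = (t + 2) - 1 from by ring,
              show l + n - 1 - (n - 2) = (l + 1) from by ring]
          rw [ih (n - 3) (by omega) (t + 2) (l + 1)]
          conv_rhs => rw [fillLayers]
          rw [dif_pos (show (0 : Int) < n from by omega)]
          rw [armDown_eq, armRight_eq, armDiag_eq]
          rw [show ((n.toNat : Int)) = n from by omega,
              show (((n - 1).toNat : Int)) = n - 1 from by omega,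
              show (((n - 2).toNat : Int)) = n - 2 from by omega]

theorem init_grids (n : Int) :
    (PySem.List.pyRange 1 (n + 1) 1).map (fun k => (PySem.List.pyRange 0 k 1).map (fun _ => (0 : Int)))
    = (PySem.List.pyRange 0 n 1).map (fun k => PySem.List.pyRepeat [(0 : Int)] (k + 1)) := by
  rw [PySem.List.pyRange_one, PySem.List.pyRange_one]
  rw [show (n + 1 - 1).toNat = (n - 0).toNat from by omega]
  rw [List.map_map, List.map_map]
  apply List.map_congr_left
  intro k _
  simp only [Function.comp_apply, PySem.List.pyRepeat_singleton]
  rw [PySem.List.pyRange_one]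
  rw [List.map_const']
  rw [List.length_map, List.length_range]
  congr 1
  omega

-- ===== VERDICT (by name: the statement is the Claim_ definition above) =====
theorem solution_spec : Claim_equal_solution := by
  intro n _
  unfold Spec_solution solution solution_alt
  simp only [init_grids n]
  rw [show ((-1 : Int), (0 : Int)) = ((0 : Int) - 1, (0 : Int)) from by norm_num]
  rw [main_lemma n.toNat n le_rfl 0 0 0]
  simp [PySem.List.foldl_append_eq_flatten]
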